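-- pv_equiv track=rewrite | github.com/kaareloide/error-explainer | checks.py | count_brackets
-- ===== SOURCE A (Python) =====
-- def count_brackets(string):
--     brackets_normal = 0
--     brackets_square = 0
--     brackets_curly = 0
--     stack = list(string)
--     while stack:
--         current = stack.pop(0)
--         if current == "(":
--             brackets_normal += 1
--         elif current == ")":
--             brackets_normal -= 1
--         elif current == "[":
--             brackets_square += 1
--         elif current == "]":
--             brackets_square -= 1
--         elif current == "{":
--             brackets_curly += 1
--         elif current == "}":
--             brackets_curly -= 1
--     return [brackets_normal, brackets_square, brackets_curly]
-- ===== SOURCE B (Python) =====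
-- from collections import Counter
--
-- def count_brackets(string):
--     c = Counter(string)
--     return [c["("] - c[")"], c["["] - c["]"], c["{"] - c["}"]]
-- ===== Notes on version B (the rewrite author's own statement) =====
-- stated objective: idiomatic
-- what changed: Replaces the pop-from-front loop with six running branches by building a Counter frequency table once and returning the three differences by direct subtraction.
import Mathlib
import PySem

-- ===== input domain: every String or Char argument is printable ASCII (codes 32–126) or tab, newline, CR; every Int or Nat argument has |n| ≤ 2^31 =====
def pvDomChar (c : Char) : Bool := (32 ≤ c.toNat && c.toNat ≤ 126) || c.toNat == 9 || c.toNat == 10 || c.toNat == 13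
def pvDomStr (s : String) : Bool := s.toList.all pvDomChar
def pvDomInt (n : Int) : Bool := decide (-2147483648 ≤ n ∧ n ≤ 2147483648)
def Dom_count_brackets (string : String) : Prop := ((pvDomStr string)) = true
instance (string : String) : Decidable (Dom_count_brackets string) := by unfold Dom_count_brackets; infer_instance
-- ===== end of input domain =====

-- B builds a Counter frequency table once and returns the three differences directly,
-- instead of A's pop-from-front loop with six branches; same return value on all inputs.

-- ===== PORT A =====
-- while stack: current = stack.pop(0); branch on current, updating the three tallies
def countBracketsLoop (stack : List Char) (bn bs bc : Int) : List Int :=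
  match stack with
  | [] => [bn, bs, bc]
  | current :: rest =>
    if current == '(' then countBracketsLoop rest (bn + 1) bs bc
    else if current == ')' then countBracketsLoop rest (bn - 1) bs bc
    else if current == '[' then countBracketsLoop rest bn (bs + 1) bc
    else if current == ']' then countBracketsLoop rest bn (bs - 1) bc
    else if current == '{' then countBracketsLoop rest bn bs (bc + 1)
    else if current == '}' then countBracketsLoop rest bn bs (bc - 1)
    else countBracketsLoop rest bn bs bc

def count_brackets (string : String) : List Int :=
  countBracketsLoop (string.toList) 0 0 0

-- ===== PORT B =====
-- c = Counter(string); [c['(']-c[')'], c['[']-c[']'], c['{']-c['}']]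
def count_brackets_alt (string : String) : List Int :=
  let c := PySem.Dict.counter string.toList
  [c.getD '(' 0 - c.getD ')' 0,
   c.getD '[' 0 - c.getD ']' 0,
   c.getD '{' 0 - c.getD '}' 0]

-- ===== PRECONDITION & SPEC =====
def Spec_count_brackets (string : String) (out : List Int) : Prop := out = count_brackets_alt string
instance (string : String) (out : List Int) : Decidable (Spec_count_brackets string out) := by unfold Spec_count_brackets; infer_instance

-- ===== CLAIM (what is proved, stated in full; the proofs are below) =====
def Claim_equal_count_brackets : Prop := ∀ (string : String), Dom_count_brackets string → Spec_count_brackets string (count_brackets string)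

-- ===== LEMMAS AND PROOFS =====

-- ===== VERDICT (by name: the statement is the Claim_ definition above) =====
theorem countBracketsLoop_eq (stack : List Char) (bn bs bc : Int) :
    countBracketsLoop stack bn bs bc =
      [bn + stack.count '(' - stack.count ')',
       bs + stack.count '[' - stack.count ']',
       bc + stack.count '{' - stack.count '}'] := by
  induction stack generalizing bn bs bc with
  | nil => simp [countBracketsLoop]
  | cons c rest ih =>
    simp only [countBracketsLoop]
    split_ifs with h1 h2 h3 h4 h5 h6 <;>
      simp_all <;> ring_nf

theorem count_brackets_spec : Claim_equal_count_brackets := by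
  intro s _
  unfold Spec_count_brackets count_brackets count_brackets_alt
  simp [countBracketsLoop_eq, PySem.Dict.getD_counter]
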